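-- pv_equiv track=rewrite | github.com/werserk/NTO-AI-4th-place | ocr/postprocessing.py | get_prefix
-- ===== SOURCE A (Python) =====
-- from string import punctuation, digits, whitespace
--
-- not_letters = punctuation + digits + whitespace
--
-- def get_prefix(word):
--     prefix_end = 0
--     for char in word:
--         if char in not_letters:
--             prefix_end += 1
--         else:
--             break
--     return prefix_end
-- ===== SOURCE B (Python) =====
-- from string import punctuation, digits, whitespace
--
-- not_letters = punctuation + digits + whitespace
--
-- def get_prefix(word):
--     # Binary search for the largest k such that word[:k] consists only of
--     # non-letter characters; that predicate is downward closed, so binary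
--     # search over k is correct.
--     lo, hi = 0, len(word)
--     while lo < hi:
--         mid = (lo + hi + 1) // 2
--         if all(c in not_letters for c in word[:mid]):
--             lo = mid
--         else:
--             hi = mid - 1
--     return lo
-- ===== Notes on version B (the rewrite author's own statement) =====
-- stated objective: alternative
-- what changed: Replaced the left-to-right counting scan with a binary search over the prefix length: the property that a prefix consists only of non-letters is downward closed, so the answer is the largest such length, found by bisection with an all() membership check per probe.
import Mathlib
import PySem

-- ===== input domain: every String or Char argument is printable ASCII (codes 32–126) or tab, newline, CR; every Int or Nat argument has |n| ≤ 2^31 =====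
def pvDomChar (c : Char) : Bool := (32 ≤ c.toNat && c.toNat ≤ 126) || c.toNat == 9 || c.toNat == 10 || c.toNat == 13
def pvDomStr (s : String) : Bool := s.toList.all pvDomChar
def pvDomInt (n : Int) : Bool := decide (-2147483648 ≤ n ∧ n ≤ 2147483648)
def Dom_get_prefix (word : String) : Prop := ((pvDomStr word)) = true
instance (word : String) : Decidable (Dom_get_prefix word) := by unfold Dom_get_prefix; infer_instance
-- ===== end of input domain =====

-- B replaces A's left-to-right counting scan with a binary search over prefix length
-- (the predicate 'word[:k] is all non-letters' is downward closed); objective: alternative.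

-- not_letters = string.punctuation + string.digits + string.whitespace
def notLetters : List Char :=
  "!\"#$%&'()*+,-./:;<=>?@[\\]^_`{|}~0123456789 \t\n\r\x0b\x0c".toList

-- ===== PORT A =====
-- the 'for char in word: if char in not_letters: prefix_end += 1 else: break' loop
def getPrefixLoopA : List Char → Int → Int
  | [], acc => acc
  | c :: rest, acc => if notLetters.contains c then getPrefixLoopA rest (acc + 1) else acc

def get_prefix (word : String) : Int := getPrefixLoopA word.toList 0

-- ===== PORT B =====
-- all(c in not_letters for c in word[:mid])
def allNonLetter (l : List Char) : Bool := l.all (fun c => notLetters.contains c)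

-- the 'while lo < hi: mid = (lo+hi+1)//2; …' bisection loop of Source B
def bsearchB (chars : List Char) (lo hi : Nat) : Nat :=
  if h : lo < hi then
    if allNonLetter (chars.take ((lo + hi + 1) / 2)) then bsearchB chars ((lo + hi + 1) / 2) hi
    else bsearchB chars lo ((lo + hi + 1) / 2 - 1)
  else lo
termination_by hi - lo
decreasing_by all_goals omega

def get_prefix_alt (word : String) : Int :=
  (bsearchB word.toList 0 word.toList.length : Int)

-- ===== PRECONDITION & SPEC =====
def Spec_get_prefix (word : String) (out : Int) : Prop := out = get_prefix_alt word
instance (word : String) (out : Int) : Decidable (Spec_get_prefix word out) := by unfold Spec_get_prefix; infer_instance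

-- ===== CLAIM (what is proved, stated in full; the proofs are below) =====
def Claim_equal_get_prefix : Prop := ∀ (word : String), Dom_get_prefix word → Spec_get_prefix word (get_prefix word)

-- ===== LEMMAS AND PROOFS =====
theorem getPrefixLoopA_eq_takeWhile (l : List Char) (acc : Int) :
    getPrefixLoopA l acc = acc + ((l.takeWhile (fun c => notLetters.contains c)).length : Int) := by
  induction l generalizing acc with
  | nil => simp [getPrefixLoopA]
  | cons c rest ih =>
    simp only [getPrefixLoopA, List.takeWhile_cons]
    cases h : notLetters.contains c with
    | true => simp only [ih, List.contains_eq_mem] at *; simp; ring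
    | false => simp only [List.contains_eq_mem] at h; simp

-- the bisection predicate is downward closed: (take k).all ↔ k ≤ |takeWhile|, for k within the list
theorem all_take_iff (l : List Char) (k : Nat) (hk : k ≤ l.length) :
    allNonLetter (l.take k) = true ↔ k ≤ (l.takeWhile (fun c => notLetters.contains c)).length := by
  induction l generalizing k with
  | nil =>
    have : k = 0 := by simpa using hk
    subst this; simp [allNonLetter]
  | cons c rest ih =>
    cases k with
    | zero => simp [allNonLetter]
    | succ k =>
      simp only [List.take_succ_cons, List.takeWhile_cons, allNonLetter, List.all_cons]
      cases h : notLetters.contains c with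
      | true =>
        simp only [if_true, Bool.true_and, List.length_cons]
        simp only [allNonLetter] at ih
        rw [ih k (by simpa using hk)]
        omega
      | false => simp

theorem bsearchB_correct (chars : List Char) (d lo hi : Nat)
    (hd : hi - lo ≤ d)
    (h1 : lo ≤ (chars.takeWhile (fun c => notLetters.contains c)).length)
    (h2 : (chars.takeWhile (fun c => notLetters.contains c)).length ≤ hi)
    (h3 : hi ≤ chars.length) :
    bsearchB chars lo hi = (chars.takeWhile (fun c => notLetters.contains c)).length := by
  induction d generalizing lo hi with
  | zero =>
    have : ¬ lo < hi := by omega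
    rw [bsearchB, dif_neg this]; omega
  | succ d ih =>
    rw [bsearchB]
    split
    · next hlt =>
      have hmid1 : lo < (lo + hi + 1) / 2 := by omega
      have hmid2 : (lo + hi + 1) / 2 ≤ hi := by omega
      split
      · next hall =>
        have := (all_take_iff chars ((lo + hi + 1) / 2) (by omega)).mp hall
        exact ih _ _ (by omega) this h2 h3
      · next hall =>
        have : ¬ ((lo + hi + 1) / 2 ≤ (chars.takeWhile (fun c => notLetters.contains c)).length) := by
          intro hle
          exact hall ((all_take_iff chars ((lo + hi + 1) / 2) (by omega)).mpr hle)
        exact ih _ _ (by omega) h1 (by omega) (by omega)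
    · omega

-- ===== VERDICT (by name: the statement is the Claim_ definition above) =====
theorem get_prefix_spec : Claim_equal_get_prefix := by
  intro word _
  unfold Spec_get_prefix get_prefix get_prefix_alt
  rw [getPrefixLoopA_eq_takeWhile,
      bsearchB_correct word.toList word.toList.length 0 word.toList.length
        (by omega) (by omega) ((List.takeWhile_prefix _).length_le) (le_refl _)]
  omega
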